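/- GENERATED by farm/mkstatement.py from design/units.tsv (unit `DGifGetExtension.COMPOSITION`) and the Specs of Gif/Spec/*.lean — do not edit.
   THE STATEMENT of the proof unit `DGifGetExtension.COMPOSITION`: the function `DGifGetExtension` (57 instructions) satisfies its contract,
   GIVEN THE STATEMENTS OF ITS 4 SEGMENTS (`Gif.Spec.DGifGetExtension.Seg<k> Lay μ u₀`: what the unit `DGifGetExtension.<k>` proves).
   No machine code is walked: `ReachVia.trans` along the segments (the exit assertion of a segment is the entry assertion of
   its successor), an induction on the loop measures. What the names mean: ProgX/Base/Spec/Basic.lean. The theorem to prove: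
   `theorem DGifGetExtension_COMPOSITION_ok : Gif.Spec.DGifGetExtension_COMPOSITION.Statement`. -/
import Gif.Code
import Gif.Dec.All
import Gif.Labels
import Gif.Spec.Reader
import Gif.Spec.Seg_DGifGetExtension
namespace Gif.Spec.DGifGetExtension_COMPOSITION
open X86 X86.User Asan

/-- The statement of unit `DGifGetExtension.COMPOSITION`. -/
def Statement : Prop :=
  ∀ (Lay : Layout) (_hLay : Lay.hi = 0x1000000) (μ : Microarch) (_hμ : UserX.MicroOK μ) (u₀ : State)
    (_h_DGifGetExtension_P : Gif.Spec.DGifGetExtension.SegP Lay μ u₀)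
    (_h_DGifGetExtension_1 : Gif.Spec.DGifGetExtension.Seg1 Lay μ u₀)
    (_h_DGifGetExtension_2 : Gif.Spec.DGifGetExtension.Seg2 Lay μ u₀)
    (_h_DGifGetExtension_E : Gif.Spec.DGifGetExtension.SegE Lay μ u₀),
    ∀ (H : Heap) (rest : List Obj) (frames : List (Nat × FrameLayout)) (F : Forest) (R : Rd), Calls Lay μ ProgX.Base.WayInv (ProgX.Base.conv u₀) Gif.L.DGifGetExtension.entry (Gif.Spec.DGifGetExtension.spec H rest frames F R)

end Gif.Spec.DGifGetExtension_COMPOSITION
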